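-- pv_equiv track=rewrite | github.com/KnowEnG/KN_Builder | code/reports/test.py | get_unmapped
-- ===== SOURCE A (Python) =====
-- def get_unmapped(results):
--     ret = {}
--     for k, v in results.items():
--         if '_most' in v:
--             ret.update({k: v["_most"]})
--         elif '_sum' in v:
--             ret.update(get_unmapped(v))
--     return ret
-- ===== SOURCE B (Python) =====
-- def get_unmapped(results):
--     return {k: v['_most'] for k, v in results.items() if '_most' in v}
-- ===== Notes on version B (the rewrite author's own statement) =====
-- stated objective: simpler
-- what changed: Replaces the recursion-with-dict-update by a single flat dict comprehension: on str->dict[str,str] inputs the recursive '_sum' branch either raises or contributes nothing, so only the '_most' entries matter.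
import Mathlib
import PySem

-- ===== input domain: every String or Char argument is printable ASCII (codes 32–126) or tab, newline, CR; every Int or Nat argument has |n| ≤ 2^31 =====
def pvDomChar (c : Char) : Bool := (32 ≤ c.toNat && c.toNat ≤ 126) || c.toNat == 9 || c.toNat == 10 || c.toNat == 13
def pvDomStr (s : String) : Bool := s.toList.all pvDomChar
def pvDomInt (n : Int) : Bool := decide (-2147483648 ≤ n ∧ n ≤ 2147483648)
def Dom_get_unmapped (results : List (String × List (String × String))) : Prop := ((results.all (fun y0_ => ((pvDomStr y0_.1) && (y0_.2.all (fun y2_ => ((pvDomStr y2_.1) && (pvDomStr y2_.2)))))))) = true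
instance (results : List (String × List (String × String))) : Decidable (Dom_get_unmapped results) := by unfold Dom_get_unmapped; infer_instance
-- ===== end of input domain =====

-- B replaces A's recursion + dict.update by one flat dict comprehension over the '_most' entries
-- (on this input type A's recursive '_sum' branch either raises or contributes nothing).

-- ===== PORT A =====
-- the recursive call get_unmapped(v) where v : dict[str,str]: iterates v.items(); for a string
-- value v2, "'_most' in v2" / "'_sum' in v2" are SUBSTRING tests and the following statement
-- raises (TypeError on v2["_most"], AttributeError on v2.items()); modelled as none.
def getUnmappedInner (v : List (String × String)) : Option (PySem.Dict String String) :=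
  v.foldl
    (fun acc kv =>
      match acc with
      | none => none
      | some ret =>
        if PySem.Str.isIn "_most" kv.2 then none        -- v2["_most"] : TypeError
        else if PySem.Str.isIn "_sum" kv.2 then none    -- v2.items() : AttributeError
        else some ret)
    (some PySem.Dict.empty)

def get_unmapped (results : List (String × List (String × String))) : List (String × String) :=
  match results.foldl
    (fun acc kv =>
      match acc with
      | none => none
      | some ret =>
        if (PySem.Dict.mk kv.2).contains "_most" then
          -- ret.update({k: v["_most"]}); getD's default is unreachable (contains holds)
          some (ret.insert kv.1 ((PySem.Dict.mk kv.2).getD "_most" ""))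
        else if (PySem.Dict.mk kv.2).contains "_sum" then
          match getUnmappedInner kv.2 with
          | none => none                                 -- Python raises; excluded by Pre_
          | some d => some (ret.update d.items)          -- ret.update(get_unmapped(v))
        else some ret)
    (some (PySem.Dict.empty : PySem.Dict String String)) with
  | none => []                                           -- Python raises; excluded by Pre_
  | some ret => ret.items

-- ===== PORT B =====
def get_unmapped_alt (results : List (String × List (String × String))) : List (String × String) :=
  (results.foldl
    (fun d kv =>
      match (PySem.Dict.mk kv.2).get? "_most" with
      | some m => d.insert kv.1 m
      | none => d)
    (PySem.Dict.empty : PySem.Dict String String)).items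

-- ===== PRECONDITION & SPEC =====
-- Pre_ excludes exactly the inputs on which A raises: an entry whose value dict lacks key '_most'
-- but has key '_sum' and contains some string value with '_most' or '_sum' as a substring.
def Pre_get_unmapped (results : List (String × List (String × String))) : Prop :=
  (results.all (fun kv =>
    (PySem.Dict.mk kv.2).contains "_most"
    || !(PySem.Dict.mk kv.2).contains "_sum"
    || kv.2.all (fun p => !PySem.Str.isIn "_most" p.2 && !PySem.Str.isIn "_sum" p.2))) = true
instance (results : List (String × List (String × String))) : Decidable (Pre_get_unmapped results) := by unfold Pre_get_unmapped; infer_instance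

def pvWitness_get_unmapped : (List (String × List (String × String))) :=
  [("a", [("_most", "x")]), ("b", [("_sum", "5"), ("y", "z")]), ("c", [("y", "z")])]

def Spec_get_unmapped (results : List (String × List (String × String))) (out : List (String × String)) : Prop := out = get_unmapped_alt results
instance (results : List (String × List (String × String))) (out : List (String × String)) : Decidable (Spec_get_unmapped results out) := by unfold Spec_get_unmapped; infer_instance

-- ===== CLAIM (what is proved, stated in full; the proofs are below) =====
def Claim_equal_get_unmapped : Prop := ∀ (results : List (String × List (String × String))), Dom_get_unmapped results → Pre_get_unmapped results → Spec_get_unmapped results (get_unmapped results)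

-- ===== LEMMAS AND PROOFS =====

theorem inner_clean (v : List (String × String))
    (h : v.all (fun p => !PySem.Str.isIn "_most" p.2 && !PySem.Str.isIn "_sum" p.2) = true) :
    getUnmappedInner v = some PySem.Dict.empty := by
  unfold getUnmappedInner
  induction v with
  | nil => rfl
  | cons p rest ih =>
    simp only [List.all_cons, Bool.and_eq_true, Bool.not_eq_true'] at h
    simp only [List.foldl_cons, h.1.1, h.1.2]
    exact ih (by simpa using h.2)

theorem fold_agree (results : List (String × List (String × String)))
    (ret : PySem.Dict String String)
    (h : Pre_get_unmapped results) :
    results.foldl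
      (fun acc kv =>
        match acc with
        | none => none
        | some ret =>
          if (PySem.Dict.mk kv.2).contains "_most" then
            some (ret.insert kv.1 ((PySem.Dict.mk kv.2).getD "_most" ""))
          else if (PySem.Dict.mk kv.2).contains "_sum" then
            match getUnmappedInner kv.2 with
            | none => none
            | some d => some (ret.update d.items)
          else some ret)
      (some ret)
    = some (results.foldl
        (fun d kv =>
          match (PySem.Dict.mk kv.2).get? "_most" with
          | some m => d.insert kv.1 m
          | none => d)
        ret) := by
  induction results generalizing ret with
  | nil => rfl
  | cons kv rest ih =>
    unfold Pre_get_unmapped at h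
    rw [List.all_cons, Bool.and_eq_true] at h
    obtain ⟨hhead, htail⟩ := h
    have hrest : Pre_get_unmapped rest := htail
    simp only [List.foldl_cons]
    by_cases hm : (PySem.Dict.mk kv.2).contains "_most" = true
    · have hm2 : ((PySem.Dict.mk kv.2).get? "_most").isSome = true := by
        rw [← PySem.Dict.contains_eq_isSome_get?]; exact hm
      rcases Option.isSome_iff_exists.mp hm2 with ⟨m, hget⟩
      rw [hm, if_pos rfl, hget,
          PySem.Dict.getD_of_get?_eq_some (d := PySem.Dict.mk kv.2) (d0 := "") hget]
      exact ih _ hrest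
    · have hm' : (PySem.Dict.mk kv.2).contains "_most" = false := Bool.eq_false_iff.mpr hm
      have hget : (PySem.Dict.mk kv.2).get? "_most" = none := by
        cases hg : (PySem.Dict.mk kv.2).get? "_most" with
        | none => rfl
        | some m =>
          rw [PySem.Dict.contains_eq_isSome_get?, hg] at hm'
          simp at hm'
      rw [hm', hget]
      simp only [Bool.false_eq_true, if_false]
      by_cases hs : (PySem.Dict.mk kv.2).contains "_sum" = true
      · have hclean : kv.2.all (fun p => !PySem.Str.isIn "_most" p.2 && !PySem.Str.isIn "_sum" p.2) = true := by
          rcases Bool.or_eq_true .. |>.mp hhead with h1 | h1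
          · rcases Bool.or_eq_true .. |>.mp h1 with h2 | h2
            · exact absurd h2 hm
            · rw [Bool.not_eq_true'] at h2
              rw [h2] at hs; cases hs
          · exact h1
        rw [hs, if_pos rfl, inner_clean kv.2 hclean]
        exact ih _ hrest
      · rw [if_neg hs]
        exact ih _ hrest

-- ===== VERDICT (by name: the statement is the Claim_ definition above) =====
theorem get_unmapped_spec : Claim_equal_get_unmapped := by
  intro results _ hpre
  unfold Spec_get_unmapped get_unmapped get_unmapped_alt
  rw [fold_agree results PySem.Dict.empty hpre]
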